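-- pv_equiv track=rewrite | github.com/socathie/CodeFights | Tournaments/findHeapPredicate.py | findHeapPredicate
-- ===== SOURCE A (Python) =====
-- def findHeapPredicate(heap):
--
--     allGreater, allLess = True, True
--     i = 0
--     while 2 * i + 1 < len(heap):
--         sign1 = heap[i] - heap[2 * i + 1]
--         sign2 = 0
--         if 2 * i + 2 < len(heap):
--             sign2 = heap[i] - heap[2 * i + 2]
--         allGreater = allGreater and sign1 >= 0 and sign2 >= 0
--         allLess = allLess and sign1 <= 0 and sign2 <= 0
--         i += 1
--
--     if allGreater and allLess:
--         return '?'
--     elif allGreater: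
--         return '>='
--     elif allLess:
--         return '<='
--     else:
--         return '!'
-- ===== SOURCE B (Python) =====
-- def findHeapPredicate(heap):
--     n = len(heap)
--
--     def maxOK(i):
--         # subtree rooted at i satisfies the max-heap property
--         l = 2 * i + 1
--         if l >= n:
--             return True
--         if heap[i] < heap[l] or not maxOK(l):
--             return False
--         r = l + 1
--         return r >= n or (heap[i] >= heap[r] and maxOK(r))
--
--     def minOK(i):
--         # subtree rooted at i satisfies the min-heap property
--         l = 2 * i + 1
--         if l >= n:
--             return True
--         if heap[i] > heap[l] or not minOK(l):
--             return False
--         r = l + 1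
--         return r >= n or (heap[i] <= heap[r] and minOK(r))
--
--     isMax, isMin = maxOK(0), minOK(0)
--     if isMax and isMin:
--         return '?'
--     if isMax:
--         return '>='
--     if isMin:
--         return '<='
--     return '!'
-- ===== Notes on version B (the rewrite author's own statement) =====
-- stated objective: alternative
-- what changed: Replaces A's flat parent-indexed while-loop that carries both flags through every iteration by two short-circuiting recursive tree descents (maxOK/minOK on the subtree rooted at each node), judging the max- and min-heap properties independently and stopping at the first violated edge.
import Mathlib
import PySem

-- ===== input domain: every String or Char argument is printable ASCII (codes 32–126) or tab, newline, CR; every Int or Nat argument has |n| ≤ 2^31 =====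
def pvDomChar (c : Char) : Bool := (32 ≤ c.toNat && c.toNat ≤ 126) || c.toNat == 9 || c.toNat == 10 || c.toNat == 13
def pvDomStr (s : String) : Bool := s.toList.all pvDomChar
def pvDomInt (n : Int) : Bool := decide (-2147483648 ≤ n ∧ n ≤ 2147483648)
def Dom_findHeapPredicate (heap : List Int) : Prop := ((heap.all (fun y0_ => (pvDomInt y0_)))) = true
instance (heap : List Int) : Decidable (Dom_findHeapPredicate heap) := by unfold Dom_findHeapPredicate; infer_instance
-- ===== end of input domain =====

-- B replaces A's flat parent-indexed while-loop by two short-circuiting recursive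
-- tree descents (maxOK/minOK over each subtree); same O(n) cost, different traversal.


-- ===== PORT A =====
-- A's while loop over parents i; fuel = heap.length bounds the iteration count
-- (indices the loop reads are always in range, so list getD is exact)
def loopA (heap : List Int) : Nat → Bool → Bool → Nat → Bool × Bool
  | 0, aG, aL, _ => (aG, aL)
  | fuel + 1, aG, aL, i =>
    if 2 * i + 1 < heap.length then
      let sign1 := heap.getD i 0 - heap.getD (2 * i + 1) 0
      let sign2 := if 2 * i + 2 < heap.length then heap.getD i 0 - heap.getD (2 * i + 2) 0 else 0
      loopA heap fuel (aG && decide (sign1 ≥ 0) && decide (sign2 ≥ 0))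
                      (aL && decide (sign1 ≤ 0) && decide (sign2 ≤ 0)) (i + 1)
    else (aG, aL)

def findHeapPredicate (heap : List Int) : String :=
  let r := loopA heap heap.length true true 0
  if r.1 && r.2 then "?"
  else if r.1 then ">="
  else if r.2 then "<="
  else "!"

-- ===== PORT B =====
-- B's recursive descent: does the subtree rooted at i satisfy the max-heap property?
-- (fuel = heap.length bounds the descent depth)
def maxOK (heap : List Int) : Nat → Nat → Bool
  | 0, _ => true
  | fuel + 1, i =>
    if 2 * i + 1 < heap.length then
      if decide (heap.getD i 0 < heap.getD (2 * i + 1) 0) || !maxOK heap fuel (2 * i + 1) then false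
      else decide (2 * i + 2 ≥ heap.length) ||
           (decide (heap.getD i 0 ≥ heap.getD (2 * i + 2) 0) && maxOK heap fuel (2 * i + 2))
    else true

-- ... and the min-heap property
def minOK (heap : List Int) : Nat → Nat → Bool
  | 0, _ => true
  | fuel + 1, i =>
    if 2 * i + 1 < heap.length then
      if decide (heap.getD i 0 > heap.getD (2 * i + 1) 0) || !minOK heap fuel (2 * i + 1) then false
      else decide (2 * i + 2 ≥ heap.length) ||
           (decide (heap.getD i 0 ≤ heap.getD (2 * i + 2) 0) && minOK heap fuel (2 * i + 2))
    else true

def findHeapPredicate_alt (heap : List Int) : String :=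
  let isMax := maxOK heap heap.length 0
  let isMin := minOK heap heap.length 0
  if isMax && isMin then "?"
  else if isMax then ">="
  else if isMin then "<="
  else "!"

-- ===== PRECONDITION & SPEC =====
def Spec_findHeapPredicate (heap : List Int) (out : String) : Prop := out = findHeapPredicate_alt heap
instance (heap : List Int) (out : String) : Decidable (Spec_findHeapPredicate heap out) := by unfold Spec_findHeapPredicate; infer_instance

-- ===== CLAIM (what is proved, stated in full; the proofs are below) =====
def Claim_equal_findHeapPredicate : Prop := ∀ (heap : List Int), Dom_findHeapPredicate heap → Spec_findHeapPredicate heap (findHeapPredicate heap)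

-- ===== LEMMAS AND PROOFS =====

-- edge predicates, child-indexed
def gG (heap : List Int) (j : Nat) : Bool := decide (heap.getD ((j - 1) / 2) 0 - heap.getD j 0 ≥ 0)
def gL (heap : List Int) (j : Nat) : Bool := decide (heap.getD ((j - 1) / 2) 0 - heap.getD j 0 ≤ 0)

-- termination facts for sub's decreasing_by
theorem pvDecL (n i : Nat) (h : 2 * i + 1 < n) : n - (2 * i + 1) < n - i := by omega
theorem pvDecR (n i : Nat) (h : 2 * i + 1 < n) : n - (2 * i + 2) < n - i := by omega

-- the (non-root) indices of the subtree rooted at i, in a heap of size n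
def sub (n i : Nat) : List Nat :=
  if h : 2 * i + 1 < n then
    (2 * i + 1) :: sub n (2 * i + 1) ++ (if 2 * i + 2 < n then (2 * i + 2) :: sub n (2 * i + 2) else [])
  else []
termination_by n - i
decreasing_by
  · exact pvDecL n i h
  · exact pvDecR n i h

theorem sub_expand (n i : Nat) (h : 2 * i + 1 < n) :
    sub n i = (2 * i + 1) :: sub n (2 * i + 1)
      ++ (if 2 * i + 2 < n then (2 * i + 2) :: sub n (2 * i + 2) else []) := by
  rw [sub, dif_pos h]

-- A's loop from parent i accumulates the edge predicates over children ≥ 2i+1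
theorem loopA_eq (heap : List Int) (fuel : Nat) : ∀ (aG aL : Bool) (i : Nat),
    heap.length ≤ fuel + i →
    loopA heap fuel aG aL i
    = (aG && (List.range' (2 * i + 1) (heap.length - (2 * i + 1))).all (gG heap),
       aL && (List.range' (2 * i + 1) (heap.length - (2 * i + 1))).all (gL heap)) := by
  induction fuel with
  | zero =>
    intro aG aL i hf
    have : heap.length - (2 * i + 1) = 0 := by omega
    simp [loopA, this]
  | succ fuel ih =>
    intro aG aL i hf
    rw [loopA]
    by_cases h : 2 * i + 1 < heap.length
    · rw [if_pos h, ih _ _ (i + 1) (by omega)]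
      have hp1 : (2 * i + 1 - 1) / 2 = i := by omega
      have hp2 : (2 * i + 2 - 1) / 2 = i := by omega
      by_cases h2 : 2 * i + 2 < heap.length
      · have hr : List.range' (2 * i + 1) (heap.length - (2 * i + 1))
            = (2 * i + 1) :: (2 * i + 2) :: List.range' (2 * (i + 1) + 1) (heap.length - (2 * (i + 1) + 1)) := by
          have e1 : heap.length - (2 * i + 1) = (heap.length - (2 * (i + 1) + 1)) + 1 + 1 := by omega
          rw [e1, List.range'_succ, List.range'_succ]
          norm_num
          omega
        rw [hr]
        simp only [if_pos h2, List.all_cons, gG, gL, hp1, hp2, Bool.and_assoc]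
      · have e1 : heap.length - (2 * i + 1) = 1 := by omega
        have hr : List.range' (2 * i + 1) (heap.length - (2 * i + 1)) = [2 * i + 1] := by
          rw [e1, List.range'_one]
        have hr2 : heap.length - (2 * (i + 1) + 1) = 0 := by omega
        rw [hr, hr2]
        simp only [if_neg h2, List.range'_zero, List.all_nil, List.all_cons, gG, gL, hp1,
          Bool.and_true, decide_true, ge_iff_le, le_refl]
    · rw [if_neg h]
      have : heap.length - (2 * i + 1) = 0 := by omega
      simp [this]

-- B's descent equals the conjunction of the edge predicates over the subtree
theorem maxOK_eq (heap : List Int) (fuel : Nat) : ∀ (i : Nat),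
    heap.length ≤ fuel + i →
    maxOK heap fuel i = (sub heap.length i).all (gG heap) := by
  induction fuel with
  | zero =>
    intro i hf
    rw [maxOK, sub, dif_neg (by omega : ¬ 2 * i + 1 < heap.length)]
    rfl
  | succ fuel ih =>
    intro i hf
    rw [maxOK]
    by_cases h : 2 * i + 1 < heap.length
    · rw [if_pos h, sub_expand _ _ h, ih (2 * i + 1) (by omega)]
      have hp1 : (2 * i + 1 - 1) / 2 = i := by omega
      have hp2 : (2 * i + 2 - 1) / 2 = i := by omega
      have hg1 : gG heap (2 * i + 1) = !decide (heap.getD i 0 < heap.getD (2 * i + 1) 0) := by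
        simp only [gG, hp1]
        rw [Bool.eq_iff_iff]
        simp only [decide_eq_true_iff, Bool.not_eq_true', decide_eq_false_iff_not]
        omega
      by_cases h2 : 2 * i + 2 < heap.length
      · rw [ih (2 * i + 2) (by omega)]
        have hg2 : gG heap (2 * i + 2) = decide (heap.getD i 0 ≥ heap.getD (2 * i + 2) 0) := by
          simp only [gG, hp2]
          rw [Bool.eq_iff_iff]
          simp only [decide_eq_true_iff]
          omega
        have hn : decide (2 * i + 2 ≥ heap.length) = false := by simp; omega
        rw [if_pos h2]
        simp only [List.all_append, List.all_cons, hg1, hg2, hn]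
        cases hd : decide (heap.getD i 0 < heap.getD (2 * i + 1) 0) <;>
        cases hX : (sub heap.length (2 * i + 1)).all (gG heap) <;>
        cases hY : (sub heap.length (2 * i + 2)).all (gG heap) <;> simp
      · have hn : decide (2 * i + 2 ≥ heap.length) = true := by simp; omega
        rw [if_neg h2]
        simp only [List.append_nil, List.all_cons, hg1, hn]
        cases hd : decide (heap.getD i 0 < heap.getD (2 * i + 1) 0) <;>
        cases hX : (sub heap.length (2 * i + 1)).all (gG heap) <;> simp
    · rw [if_neg h, sub, dif_neg h]; rfl

theorem minOK_eq (heap : List Int) (fuel : Nat) : ∀ (i : Nat),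
    heap.length ≤ fuel + i →
    minOK heap fuel i = (sub heap.length i).all (gL heap) := by
  induction fuel with
  | zero =>
    intro i hf
    rw [minOK, sub, dif_neg (by omega : ¬ 2 * i + 1 < heap.length)]
    rfl
  | succ fuel ih =>
    intro i hf
    rw [minOK]
    by_cases h : 2 * i + 1 < heap.length
    · rw [if_pos h, sub_expand _ _ h, ih (2 * i + 1) (by omega)]
      have hp1 : (2 * i + 1 - 1) / 2 = i := by omega
      have hp2 : (2 * i + 2 - 1) / 2 = i := by omega
      have hg1 : gL heap (2 * i + 1) = !decide (heap.getD i 0 > heap.getD (2 * i + 1) 0) := by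
        simp only [gL, hp1]
        rw [Bool.eq_iff_iff]
        simp only [decide_eq_true_iff, Bool.not_eq_true', decide_eq_false_iff_not]
        omega
      by_cases h2 : 2 * i + 2 < heap.length
      · rw [ih (2 * i + 2) (by omega)]
        have hg2 : gL heap (2 * i + 2) = decide (heap.getD i 0 ≤ heap.getD (2 * i + 2) 0) := by
          simp only [gL, hp2]
          rw [Bool.eq_iff_iff]
          simp only [decide_eq_true_iff]
          omega
        have hn : decide (2 * i + 2 ≥ heap.length) = false := by simp; omega
        rw [if_pos h2]
        simp only [List.all_append, List.all_cons, hg1, hg2, hn]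
        cases hd : decide (heap.getD i 0 > heap.getD (2 * i + 1) 0) <;>
        cases hX : (sub heap.length (2 * i + 1)).all (gL heap) <;>
        cases hY : (sub heap.length (2 * i + 2)).all (gL heap) <;> simp
      · have hn : decide (2 * i + 2 ≥ heap.length) = true := by simp; omega
        rw [if_neg h2]
        simp only [List.append_nil, List.all_cons, hg1, hn]
        cases hd : decide (heap.getD i 0 > heap.getD (2 * i + 1) 0) <;>
        cases hX : (sub heap.length (2 * i + 1)).all (gL heap) <;> simp
    · rw [if_neg h, sub, dif_neg h]; rfl

-- every member of sub n i lies strictly between i and n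
theorem mem_sub_bounds (n i j : Nat) (hj : j ∈ sub n i) : i < j ∧ j < n := by
  rw [sub] at hj
  by_cases h : 2 * i + 1 < n
  · rw [dif_pos h] at hj
    rcases List.mem_cons.1 hj with rfl | hj
    · omega
    rcases List.mem_append.1 hj with hj | hj
    · have := mem_sub_bounds n (2 * i + 1) j hj; omega
    · by_cases h2 : 2 * i + 2 < n
      · rw [if_pos h2] at hj
        rcases List.mem_cons.1 hj with rfl | hj
        · omega
        · have := mem_sub_bounds n (2 * i + 2) j hj; omega
      · rw [if_neg h2] at hj; simp at hj
  · rw [dif_neg h] at hj; simp at hj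
termination_by n - i

-- subtrees of members are included
theorem subIncl (n i p : Nat) (hp : p ∈ sub n i) : sub n p ⊆ sub n i := by
  by_cases h : 2 * i + 1 < n
  · rw [sub_expand n i h] at hp ⊢
    rcases List.mem_cons.1 hp with rfl | hp
    · exact fun x hx => List.mem_cons_of_mem _ (List.mem_append_left _ hx)
    rcases List.mem_append.1 hp with hp | hp
    · exact fun x hx => List.mem_cons_of_mem _
        (List.mem_append_left _ (subIncl n (2 * i + 1) p hp hx))
    · by_cases h2 : 2 * i + 2 < n
      · rw [if_pos h2] at hp ⊢
        rcases List.mem_cons.1 hp with rfl | hp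
        · exact fun x hx => List.mem_cons_of_mem _
            (List.mem_append_right _ (List.mem_cons_of_mem _ hx))
        · exact fun x hx => List.mem_cons_of_mem _ (List.mem_append_right _
            (List.mem_cons_of_mem _ (subIncl n (2 * i + 2) p hp hx)))
      · rw [if_neg h2] at hp; simp at hp
  · rw [sub, dif_neg h] at hp; simp at hp
termination_by n - i

-- children of members are members
theorem child_mem (n i p c : Nat) (hp : p ∈ sub n i) (hc : c < n)
    (hch : c = 2 * p + 1 ∨ c = 2 * p + 2) : c ∈ sub n i := by
  apply subIncl n i p hp
  have h1 : 2 * p + 1 < n := by omega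
  rw [sub_expand n p h1]
  rcases hch with rfl | rfl
  · exact List.mem_cons_self
  · rw [if_pos hc]
    exact List.mem_cons_of_mem _ (List.mem_append_right _ List.mem_cons_self)

-- all indices 1..n-1 are in the subtree of the root
theorem mem_sub_root (n j : Nat) (h1 : 1 ≤ j) (h2 : j < n) : j ∈ sub n 0 := by
  have hch : j = 2 * ((j - 1) / 2) + 1 ∨ j = 2 * ((j - 1) / 2) + 2 := by omega
  by_cases hp0 : (j - 1) / 2 = 0
  · rw [sub, dif_pos (by omega : 2 * 0 + 1 < n)]
    rcases hch with hj | hj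
    · rw [hp0] at hj; simp only [hj]
      norm_num
    · rw [hp0] at hj
      apply List.mem_cons_of_mem
      apply List.mem_append_right
      rw [if_pos (by omega : 2 * 0 + 2 < n), hj]
      norm_num
  · have hplt : (j - 1) / 2 < j := by omega
    have hp1 : 1 ≤ (j - 1) / 2 := by omega
    have hpm := mem_sub_root n ((j - 1) / 2) hp1 (by omega)
    exact child_mem n 0 ((j - 1) / 2) j hpm h2 hch
termination_by j

-- sub n 0 has the same members as range' 1 (n-1), so .all agrees
theorem all_sub_eq (heap : List Int) (p : Nat → Bool) :
    (sub heap.length 0).all p = (List.range' 1 (heap.length - 1)).all p := by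
  rw [Bool.eq_iff_iff, List.all_eq_true, List.all_eq_true]
  constructor
  · intro h x hx
    apply h
    rw [List.mem_range'_1] at hx
    exact mem_sub_root _ x hx.1 (by omega)
  · intro h x hx
    apply h
    rw [List.mem_range'_1]
    have := mem_sub_bounds _ _ _ hx
    omega

-- ===== VERDICT (by name: the statement is the Claim_ definition above) =====
theorem findHeapPredicate_spec : Claim_equal_findHeapPredicate := by
  intro heap _
  unfold Spec_findHeapPredicate findHeapPredicate findHeapPredicate_alt
  rw [loopA_eq heap heap.length true true 0 (by omega),
      maxOK_eq heap heap.length 0 (by omega), minOK_eq heap heap.length 0 (by omega),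
      all_sub_eq, all_sub_eq]
  simp
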